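-- pv_equiv track=rewrite | github.com/43200/Employee_Sentiment_Analysis | src/labeler.py | lexicon_label
-- ===== SOURCE A (Python) =====
-- POS = set("good great excellent happy love satisfied pleased awesome like".split())
--
-- NEG = set("bad poor terrible awful hate unhappy frustrated upset angry dissatisfied".split())
--
-- def lexicon_label(text):
--     tokens = str(text).split()
--     pos = sum(1 for t in tokens if t in POS)
--     neg = sum(1 for t in tokens if t in NEG)
--     if pos>neg and pos>0:
--         return "Positive"
--     if neg>pos and neg>0:
--         return "Negative"
--     return "Neutral"
-- ===== SOURCE B (Python) =====
-- POS = set("good great excellent happy love satisfied pleased awesome like".split())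
--
-- NEG = set("bad poor terrible awful hate unhappy frustrated upset angry dissatisfied".split())
--
-- def lexicon_label(text):
--     c = {}
--     for t in str(text).split():
--         c[t] = c.get(t, 0) + 1
--     pos = sum(c.get(w, 0) for w in POS)
--     neg = sum(c.get(w, 0) for w in NEG)
--     if pos > neg and pos > 0:
--         return "Positive"
--     if neg > pos and neg > 0:
--         return "Negative"
--     return "Neutral"
-- ===== Notes on version B (the rewrite author's own statement) =====
-- stated objective: idiomatic
-- what changed: B builds a single frequency table of the tokens in one pass and then sums the counts by iterating over the fixed lexicon sets, instead of A's two separate membership scans over the token list.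
import Mathlib
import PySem

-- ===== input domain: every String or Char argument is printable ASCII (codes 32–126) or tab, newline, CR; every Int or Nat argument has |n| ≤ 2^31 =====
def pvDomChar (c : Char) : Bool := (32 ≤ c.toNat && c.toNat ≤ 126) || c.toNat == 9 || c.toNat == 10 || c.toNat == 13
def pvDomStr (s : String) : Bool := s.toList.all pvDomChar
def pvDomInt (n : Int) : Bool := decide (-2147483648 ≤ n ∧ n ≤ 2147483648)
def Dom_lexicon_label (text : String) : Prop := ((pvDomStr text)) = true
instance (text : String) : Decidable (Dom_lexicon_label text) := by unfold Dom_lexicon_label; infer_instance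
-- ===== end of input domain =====

-- B builds one token-frequency table and sums it over the lexicon sets (idiomatic); A scans the token list twice.

-- ===== PORT A =====
def pvPOS : PySem.Set String :=
  PySem.Set.ofList (PySem.Str.split₀ "good great excellent happy love satisfied pleased awesome like")

def pvNEG : PySem.Set String :=
  PySem.Set.ofList (PySem.Str.split₀ "bad poor terrible awful hate unhappy frustrated upset angry dissatisfied")

def lexicon_label (text : String) : String :=
  let tokens := PySem.Str.split₀ text
  let pos : Int := tokens.foldl (fun acc t => if PySem.Set.contains pvPOS t then acc + 1 else acc) 0
  let neg : Int := tokens.foldl (fun acc t => if PySem.Set.contains pvNEG t then acc + 1 else acc) 0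
  if pos > neg ∧ pos > 0 then "Positive"
  else if neg > pos ∧ neg > 0 then "Negative"
  else "Neutral"

-- ===== PORT B =====
def lexicon_label_alt (text : String) : String :=
  let c : PySem.Dict String Int :=
    (PySem.Str.split₀ text).foldl (fun d t => d.insert t (d.getD t 0 + 1)) PySem.Dict.empty
  let pos : Int := (pvPOS.map (fun w => c.getD w 0)).sum
  let neg : Int := (pvNEG.map (fun w => c.getD w 0)).sum
  if pos > neg ∧ pos > 0 then "Positive"
  else if neg > pos ∧ neg > 0 then "Negative"
  else "Neutral"

-- ===== PRECONDITION & SPEC =====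
def Spec_lexicon_label (text : String) (out : String) : Prop := out = lexicon_label_alt text
instance (text : String) (out : String) : Decidable (Spec_lexicon_label text out) := by unfold Spec_lexicon_label; infer_instance

-- ===== CLAIM (what is proved, stated in full; the proofs are below) =====
def Claim_equal_lexicon_label : Prop := ∀ (text : String), Dom_lexicon_label text → Spec_lexicon_label text (lexicon_label text)

-- ===== LEMMAS AND PROOFS =====

-- counting tokens equal to s plus tokens in S (s ∉ S) = tokens in s::S
theorem countP_cons_set (s : String) (S : List String) (hs : s ∉ S) (xs : List String) :
    xs.countP (fun t => PySem.Set.contains (s :: S) t) =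
      xs.count s + xs.countP (fun t => PySem.Set.contains S t) := by
  induction xs with
  | nil => simp
  | cons x xs ih =>
    rw [List.countP_cons, List.countP_cons, List.count_cons, ih]
    by_cases hxs : x = s
    · subst hxs
      simp [PySem.Set.contains_eq_listContains, hs]
      omega
    · by_cases hxS : x ∈ S
      · simp [PySem.Set.contains_eq_listContains, hxs, hxS]
        omega
      · simp [PySem.Set.contains_eq_listContains, hxs, hxS]

-- sum of per-word counts over a duplicate-free lexicon = one countP over the tokens
theorem sum_counts_eq_countP (S : List String) (hS : S.Nodup) (xs : List String) :
    (S.map (fun w => (xs.count w : Int))).sum =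
      (xs.countP (fun t => PySem.Set.contains S t) : Int) := by
  induction S with
  | nil => simp [PySem.Set.contains]
  | cons s S ih =>
    have hs : s ∉ S := (List.nodup_cons.mp hS).1
    have hS' : S.Nodup := (List.nodup_cons.mp hS).2
    rw [List.map_cons, List.sum_cons, ih hS', countP_cons_set s S hs]
    push_cast
    ring

theorem count_side (S : PySem.Set String) (hS : S.Nodup) (xs : List String) :
    xs.foldl (fun acc t => if PySem.Set.contains S t then acc + 1 else acc) (0 : Int) =
      (S.map (fun w =>
        (xs.foldl (fun d t => d.insert t (d.getD t 0 + 1)) PySem.Dict.empty).getD w 0)).sum := by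
  have hc : ∀ w, (xs.foldl (fun d t => d.insert t (d.getD t 0 + 1)) PySem.Dict.empty).getD w 0
      = (xs.count w : Int) := by
    intro w
    simpa using PySem.Dict.getD_foldl_insert_add_one (d := PySem.Dict.empty) (l := xs) (v := w)
  calc xs.foldl (fun acc t => if PySem.Set.contains S t then acc + 1 else acc) (0 : Int)
      = 0 + (xs.countP (fun t => PySem.Set.contains S t) : Int) :=
        PySem.List.foldl_if_add_one _ _ _
    _ = (S.map (fun w => (xs.count w : Int))).sum := by
        rw [sum_counts_eq_countP S hS xs]; ring
    _ = _ := by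
        apply congrArg List.sum
        exact (List.map_congr_left (fun w _ => (hc w).symm))

-- ===== VERDICT (by name: the statement is the Claim_ definition above) =====
theorem lexicon_label_spec : Claim_equal_lexicon_label := by
  intro text _
  show lexicon_label text = lexicon_label_alt text
  simp only [lexicon_label, lexicon_label_alt,
    count_side pvPOS (by unfold pvPOS; exact PySem.Set.nodup_ofList _),
    count_side pvNEG (by unfold pvNEG; exact PySem.Set.nodup_ofList _)]
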